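-- pv_equiv track=rewrite | github.com/Feihm-npu/MoE_Backdoor_Detection | generative_backdoors/detection/perturb_opt_utils.py | collect_perturbed_param_names_opt
-- ===== SOURCE A (Python) =====
-- def collect_perturbed_param_names_opt(
--         start_layer, end_layer, perturb_attention=True, perturb_intermediate=False, freeze_bias=False
-- ):
--     perturbed_param_names = []
--     for i in range(start_layer, end_layer + 1):
--         if perturb_attention:
--             perturbed_param_names.append(f'model.decoder.layers.{i}.self_attn.weight_perturb')
--             if not freeze_bias:
--                 perturbed_param_names.append(f'model.decoder.layers.{i}.self_attn.bias_perturb')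
--         if perturb_intermediate:
--             perturbed_param_names.append(f'model.decoder.layers.{i}.weight_perturb')
--             if not freeze_bias:
--                 perturbed_param_names.append(f'model.decoder.layers.{i}.bias_perturb')
--     return perturbed_param_names
-- ===== SOURCE B (Python) =====
-- def collect_perturbed_param_names_opt(
--         start_layer, end_layer, perturb_attention=True, perturb_intermediate=False, freeze_bias=False
-- ):
--     layers = range(start_layer, end_layer + 1)
--     cols = []
--     if perturb_attention:
--         cols.append([f'model.decoder.layers.{i}.self_attn.weight_perturb' for i in layers])
--         if not freeze_bias:
--             cols.append([f'model.decoder.layers.{i}.self_attn.bias_perturb' for i in layers])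
--     if perturb_intermediate:
--         cols.append([f'model.decoder.layers.{i}.weight_perturb' for i in layers])
--         if not freeze_bias:
--             cols.append([f'model.decoder.layers.{i}.bias_perturb' for i in layers])
--     return [name for row in zip(*cols) for name in row]
-- ===== Notes on version B (the rewrite author's own statement) =====
-- stated objective: alternative
-- what changed: B generates the names column-major (one staged pass per enabled parameter kind over all layers) and then transposes with zip(*cols) to recover the layer-major order, instead of A's single branch-heavy row-major loop.
import Mathlib
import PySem

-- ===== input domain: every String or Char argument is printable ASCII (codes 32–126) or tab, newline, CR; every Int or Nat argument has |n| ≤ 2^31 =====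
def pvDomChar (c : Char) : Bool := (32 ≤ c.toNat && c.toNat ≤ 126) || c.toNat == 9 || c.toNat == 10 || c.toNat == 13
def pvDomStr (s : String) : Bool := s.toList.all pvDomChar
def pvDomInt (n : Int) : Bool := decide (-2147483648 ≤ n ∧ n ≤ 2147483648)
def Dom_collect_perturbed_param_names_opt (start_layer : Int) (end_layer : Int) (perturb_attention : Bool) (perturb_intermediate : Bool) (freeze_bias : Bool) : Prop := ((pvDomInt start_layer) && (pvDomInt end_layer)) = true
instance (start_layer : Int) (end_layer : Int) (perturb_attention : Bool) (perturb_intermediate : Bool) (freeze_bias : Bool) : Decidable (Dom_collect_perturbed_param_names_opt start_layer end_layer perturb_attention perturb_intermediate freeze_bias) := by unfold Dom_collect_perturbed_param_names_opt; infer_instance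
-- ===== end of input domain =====

-- B builds one column of names per enabled parameter kind and transposes them (zip),
-- a column-major staged-pass alternative to A's row-major branch-heavy loop (same cost).


-- ===== PORT A =====
def collect_perturbed_param_names_opt (start_layer : Int) (end_layer : Int) (perturb_attention : Bool) (perturb_intermediate : Bool) (freeze_bias : Bool) : List String :=
  (PySem.List.pyRange start_layer (end_layer + 1) 1).foldl (fun acc i =>
    let acc :=
      if perturb_attention then
        let acc := acc ++ ["model.decoder.layers." ++ PySem.Int.toStr i ++ ".self_attn.weight_perturb"]
        if !freeze_bias then
          acc ++ ["model.decoder.layers." ++ PySem.Int.toStr i ++ ".self_attn.bias_perturb"]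
        else acc
      else acc
    if perturb_intermediate then
      let acc := acc ++ ["model.decoder.layers." ++ PySem.Int.toStr i ++ ".weight_perturb"]
      if !freeze_bias then
        acc ++ ["model.decoder.layers." ++ PySem.Int.toStr i ++ ".bias_perturb"]
      else acc
    else acc) []

-- ===== PORT B =====
-- Python's zip(*cols): take one head from every column per step, stop when a column is empty
-- (exact for the equal-length columns B builds; zip of no columns is empty).
def pvZipCols (cols : List (List String)) : List (List String) :=
  if h : cols ≠ [] ∧ cols.all (fun c => !c.isEmpty) then
    (cols.map (fun c => c.headD "")) :: pvZipCols (cols.map (fun c => c.tail))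
  else []
termination_by (cols.headD []).length
decreasing_by
  match cols, h with
  | c :: cs, ⟨_, hall⟩ =>
    simp only [List.all_cons, Bool.and_eq_true, Bool.not_eq_true'] at hall
    cases c with
    | nil => simp [List.isEmpty] at hall
    | cons a as => simp

-- B: column-major staged passes, then transpose
def pvColumns (start_layer : Int) (end_layer : Int) (pa pi fb : Bool) : List (List String) :=
  let layers := PySem.List.pyRange start_layer (end_layer + 1) 1
  (if pa then
     [layers.map (fun i => "model.decoder.layers." ++ PySem.Int.toStr i ++ ".self_attn.weight_perturb")] ++
     (if !fb then [layers.map (fun i => "model.decoder.layers." ++ PySem.Int.toStr i ++ ".self_attn.bias_perturb")] else [])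
   else []) ++
  (if pi then
     [layers.map (fun i => "model.decoder.layers." ++ PySem.Int.toStr i ++ ".weight_perturb")] ++
     (if !fb then [layers.map (fun i => "model.decoder.layers." ++ PySem.Int.toStr i ++ ".bias_perturb")] else [])
   else [])

def collect_perturbed_param_names_opt_alt (start_layer : Int) (end_layer : Int) (perturb_attention : Bool) (perturb_intermediate : Bool) (freeze_bias : Bool) : List String :=
  (pvZipCols (pvColumns start_layer end_layer perturb_attention perturb_intermediate freeze_bias)).flatten

-- ===== PRECONDITION & SPEC =====
def Spec_collect_perturbed_param_names_opt (start_layer : Int) (end_layer : Int) (perturb_attention : Bool) (perturb_intermediate : Bool) (freeze_bias : Bool) (out : List String) : Prop := out = collect_perturbed_param_names_opt_alt start_layer end_layer perturb_attention perturb_intermediate freeze_bias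
instance (start_layer : Int) (end_layer : Int) (perturb_attention : Bool) (perturb_intermediate : Bool) (freeze_bias : Bool) (out : List String) : Decidable (Spec_collect_perturbed_param_names_opt start_layer end_layer perturb_attention perturb_intermediate freeze_bias out) := by unfold Spec_collect_perturbed_param_names_opt; infer_instance

-- ===== CLAIM (what is proved, stated in full; the proofs are below) =====
def Claim_equal_collect_perturbed_param_names_opt : Prop := ∀ (start_layer : Int) (end_layer : Int) (perturb_attention : Bool) (perturb_intermediate : Bool) (freeze_bias : Bool), Dom_collect_perturbed_param_names_opt start_layer end_layer perturb_attention perturb_intermediate freeze_bias → Spec_collect_perturbed_param_names_opt start_layer end_layer perturb_attention perturb_intermediate freeze_bias (collect_perturbed_param_names_opt start_layer end_layer perturb_attention perturb_intermediate freeze_bias)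

-- ===== LEMMAS AND PROOFS =====

-- A's loop, appending a fixed per-element block, is a flatMap over per-layer suffix lists
def pvSfx (pa pi fb : Bool) : List String :=
  (if pa then [".self_attn.weight_perturb"] ++ (if !fb then [".self_attn.bias_perturb"] else []) else []) ++
  (if pi then [".weight_perturb"] ++ (if !fb then [".bias_perturb"] else []) else [])

theorem pv_step_eq (pa pi fb : Bool) (acc : List String) (i : Int) :
    (let acc :=
      if pa then
        let acc := acc ++ ["model.decoder.layers." ++ PySem.Int.toStr i ++ ".self_attn.weight_perturb"]
        if !fb then
          acc ++ ["model.decoder.layers." ++ PySem.Int.toStr i ++ ".self_attn.bias_perturb"]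
        else acc
      else acc
    if pi then
      let acc := acc ++ ["model.decoder.layers." ++ PySem.Int.toStr i ++ ".weight_perturb"]
      if !fb then
        acc ++ ["model.decoder.layers." ++ PySem.Int.toStr i ++ ".bias_perturb"]
      else acc
    else acc) =
    acc ++ (pvSfx pa pi fb).map (fun s => "model.decoder.layers." ++ PySem.Int.toStr i ++ s) := by
  cases pa <;> cases pi <;> cases fb <;> simp [pvSfx]

theorem pv_loop (pa pi fb : Bool) (l : List Int) : ∀ (acc : List String),
    l.foldl (fun acc i =>
      let acc :=
        if pa then
          let acc := acc ++ ["model.decoder.layers." ++ PySem.Int.toStr i ++ ".self_attn.weight_perturb"]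
          if !fb then
            acc ++ ["model.decoder.layers." ++ PySem.Int.toStr i ++ ".self_attn.bias_perturb"]
          else acc
        else acc
      if pi then
        let acc := acc ++ ["model.decoder.layers." ++ PySem.Int.toStr i ++ ".weight_perturb"]
        if !fb then
          acc ++ ["model.decoder.layers." ++ PySem.Int.toStr i ++ ".bias_perturb"]
        else acc
      else acc) acc
    = acc ++ l.flatMap (fun i =>
        (pvSfx pa pi fb).map (fun s => "model.decoder.layers." ++ PySem.Int.toStr i ++ s)) := by
  induction l with
  | nil => intro acc; simp
  | cons x xs ih =>
    intro acc
    rw [List.foldl_cons, pv_step_eq, ih, List.flatMap_cons, List.append_assoc]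

-- transposing equal-length columns, each a map over the same layer list, yields the row-major rows
theorem pvZip_maps (fs : List (Int → String)) (hfs : fs ≠ []) (l : List Int) :
    pvZipCols (fs.map (fun f => l.map f)) = l.map (fun i => fs.map (fun f => f i)) := by
  induction l with
  | nil =>
    rw [pvZipCols]
    match fs, hfs with
    | f :: fs', _ => simp
  | cons x xs ih =>
    have h1 : (fs.map (fun f => (x :: xs).map f)).map (fun c => c.headD "") = fs.map (fun f => f x) := by
      simp
    have h2 : (fs.map (fun f => (x :: xs).map f)).map (fun c => c.tail) = fs.map (fun f => xs.map f) := by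
      simp
    rw [pvZipCols, dif_pos ⟨by simpa using hfs, by simp⟩, h1, h2, ih, List.map_cons]

theorem pvZip_flat (fs : List (Int → String)) (hfs : fs ≠ []) (l : List Int) :
    (pvZipCols (fs.map (fun f => l.map f))).flatten = l.flatMap (fun i => fs.map (fun f => f i)) := by
  rw [pvZip_maps fs hfs, List.flatMap_def]

theorem pv_alt_eq (s e : Int) (pa pi fb : Bool) :
    collect_perturbed_param_names_opt_alt s e pa pi fb =
    (PySem.List.pyRange s (e + 1) 1).flatMap (fun i =>
      (pvSfx pa pi fb).map (fun x => "model.decoder.layers." ++ PySem.Int.toStr i ++ x)) := by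
  unfold collect_perturbed_param_names_opt_alt pvColumns
  cases pa <;> cases pi <;> cases fb <;>
    simp only [Bool.not_true, Bool.not_false, if_true, if_false,
      List.append_nil, List.nil_append, List.cons_append, List.singleton_append]
  case false.false.false =>
    rw [pvZipCols]; simp [pvSfx]
  case false.false.true =>
    rw [pvZipCols]; simp [pvSfx]
  case false.true.false =>
    simpa [pvSfx] using pvZip_flat
      [fun i => "model.decoder.layers." ++ PySem.Int.toStr i ++ ".weight_perturb",
       fun i => "model.decoder.layers." ++ PySem.Int.toStr i ++ ".bias_perturb"]
      (by simp) (PySem.List.pyRange s (e + 1) 1)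
  case false.true.true =>
    simpa [pvSfx] using pvZip_flat
      [fun i => "model.decoder.layers." ++ PySem.Int.toStr i ++ ".weight_perturb"]
      (by simp) (PySem.List.pyRange s (e + 1) 1)
  case true.false.false =>
    simpa [pvSfx] using pvZip_flat
      [fun i => "model.decoder.layers." ++ PySem.Int.toStr i ++ ".self_attn.weight_perturb",
       fun i => "model.decoder.layers." ++ PySem.Int.toStr i ++ ".self_attn.bias_perturb"]
      (by simp) (PySem.List.pyRange s (e + 1) 1)
  case true.false.true =>
    simpa [pvSfx] using pvZip_flat
      [fun i => "model.decoder.layers." ++ PySem.Int.toStr i ++ ".self_attn.weight_perturb"]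
      (by simp) (PySem.List.pyRange s (e + 1) 1)
  case true.true.false =>
    simpa [pvSfx] using pvZip_flat
      [fun i => "model.decoder.layers." ++ PySem.Int.toStr i ++ ".self_attn.weight_perturb",
       fun i => "model.decoder.layers." ++ PySem.Int.toStr i ++ ".self_attn.bias_perturb",
       fun i => "model.decoder.layers." ++ PySem.Int.toStr i ++ ".weight_perturb",
       fun i => "model.decoder.layers." ++ PySem.Int.toStr i ++ ".bias_perturb"]
      (by simp) (PySem.List.pyRange s (e + 1) 1)
  case true.true.true =>
    simpa [pvSfx] using pvZip_flat
      [fun i => "model.decoder.layers." ++ PySem.Int.toStr i ++ ".self_attn.weight_perturb",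
       fun i => "model.decoder.layers." ++ PySem.Int.toStr i ++ ".weight_perturb"]
      (by simp) (PySem.List.pyRange s (e + 1) 1)

-- ===== VERDICT (by name: the statement is the Claim_ definition above) =====
theorem collect_perturbed_param_names_opt_spec : Claim_equal_collect_perturbed_param_names_opt := by
  intro s e pa pi fb _
  unfold Spec_collect_perturbed_param_names_opt
  rw [pv_alt_eq]
  unfold collect_perturbed_param_names_opt
  rw [pv_loop, List.nil_append]
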